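-- pv_equiv track=rewrite | github.com/JD0111phys/biased_noise_tile_code | error_propagation/pauli_distribution/pauli_strings.py | convert_gate_sequence
-- ===== SOURCE A (Python) =====
-- from typing import List, Tuple, Dict, Optional, Any, cast
--
-- GateOp = Tuple[str, List[int]]
--
-- def convert_gate_sequence(gate_sequence: List[GateOp], conversion_type: str) -> List[GateOp]:
--     """
--     Convert a gate sequence by decomposing gates into a platform-native two-qubit gate.
--
--     Single-qubit helper gates (H, S, S_DAG) are inserted on the **target** qubit of
--     each two-qubit pair (i.e., every second element of the qubit list: index 1, 3, 5…).
--
--     Args: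
--         gate_sequence: List of (gate_name, qubit_indices) tuples describing the
--             original circuit, where qubit_indices for two-qubit gates follows the
--             flat [ctrl0, tgt0, ctrl1, tgt1, …] convention.
--         conversion_type: Decomposition strategy to apply:
--             - ``"CZ_native"``: Replaces CX with ``H CZ H`` and CY with
--               ``S H CZ H S_DAG`` (helper gates on target qubits only).
--             - ``"CNOT_native"``: Replaces CZ with ``H CX H`` and CY with
--               ``S CX S_DAG`` (helper gates on target qubits only).
--             Gates not matched by the strategy are passed through unchanged.
--
--     Returns:
--         A new list of (gate_name, qubit_indices) tuples with the same structure
--         as gate_sequence, containing the decomposed gate operations.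
--     """
--     converted_sequence: List[GateOp] = []
--     for gate_type, qubits in gate_sequence:
--         if conversion_type == "CZ_native" and gate_type == "CX":
--             # Convert CX to H CZ H, with H on odd entries
--             odd_qubits = [qubits[i] for i in range(1, len(qubits), 2)]
--             converted_sequence.append(("H", odd_qubits))
--             converted_sequence.append(("CZ", qubits))
--             converted_sequence.append(("H", odd_qubits))
--         elif conversion_type == "CZ_native" and gate_type == "CY":
--             # Convert CY to S H CZ H SDAG, with S, H, and SDAG on odd entries
--             odd_qubits = [qubits[i] for i in range(1, len(qubits), 2)]
--             converted_sequence.append(("S", odd_qubits))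
--             converted_sequence.append(("H", odd_qubits))
--             converted_sequence.append(("CZ", qubits))
--             converted_sequence.append(("H", odd_qubits))
--             converted_sequence.append(("S_DAG", odd_qubits))
--         elif conversion_type == "CNOT_native" and gate_type == "CZ":
--             # Convert CZ to H CX H, with H on odd entries
--             odd_qubits = [qubits[i] for i in range(1, len(qubits), 2)]
--             converted_sequence.append(("H", odd_qubits))
--             converted_sequence.append(("CX", qubits))
--             converted_sequence.append(("H", odd_qubits))
--         elif conversion_type == "CNOT_native" and gate_type == "CY":
--             # Convert CY to S CX SDAG, with S and SDAG on odd entries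
--             odd_qubits = [qubits[i] for i in range(1, len(qubits), 2)]
--             converted_sequence.append(("S", odd_qubits))
--             converted_sequence.append(("CX", qubits))
--             converted_sequence.append(("S_DAG", odd_qubits))
--         else:
--             # Keep the gate as is
--             converted_sequence.append((gate_type, qubits))
--     return converted_sequence
-- ===== SOURCE B (Python) =====
-- from typing import List, Tuple
--
-- GateOp = Tuple[str, List[int]]
--
-- def _rewrite(gate_type: str, qubits: List[int], conversion_type: str) -> List[GateOp]:
--     """Recursive rewrite rules: CY is reduced to S.CX.S_DAG and the CX is then
--     rewritten recursively by the single native-gate rule; fixpoint otherwise."""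
--     odd = qubits[1::2]
--     if gate_type == "CY" and conversion_type in ("CZ_native", "CNOT_native"):
--         return [("S", odd)] + _rewrite("CX", qubits, conversion_type) + [("S_DAG", odd)]
--     if gate_type == "CX" and conversion_type == "CZ_native":
--         return [("H", odd), ("CZ", qubits), ("H", odd)]
--     if gate_type == "CZ" and conversion_type == "CNOT_native":
--         return [("H", odd), ("CX", qubits), ("H", odd)]
--     return [(gate_type, qubits)]
--
-- def convert_gate_sequence(gate_sequence: List[GateOp], conversion_type: str) -> List[GateOp]:
--     return [op for gate_type, qubits in gate_sequence
--                for op in _rewrite(gate_type, qubits, conversion_type)]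
-- ===== Notes on version B (the rewrite author's own statement) =====
-- stated objective: alternative
-- what changed: Replaced the flat four-branch case enumeration by a recursive rewrite-rule system: CY is reduced to S.CX.S_DAG and the inner CX is rewritten recursively by the single native-gate rule (CX->H CZ H or CZ->H CX H), so the CY cases are derived instead of hard-coded; results are flattened by a comprehension.
import Mathlib
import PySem

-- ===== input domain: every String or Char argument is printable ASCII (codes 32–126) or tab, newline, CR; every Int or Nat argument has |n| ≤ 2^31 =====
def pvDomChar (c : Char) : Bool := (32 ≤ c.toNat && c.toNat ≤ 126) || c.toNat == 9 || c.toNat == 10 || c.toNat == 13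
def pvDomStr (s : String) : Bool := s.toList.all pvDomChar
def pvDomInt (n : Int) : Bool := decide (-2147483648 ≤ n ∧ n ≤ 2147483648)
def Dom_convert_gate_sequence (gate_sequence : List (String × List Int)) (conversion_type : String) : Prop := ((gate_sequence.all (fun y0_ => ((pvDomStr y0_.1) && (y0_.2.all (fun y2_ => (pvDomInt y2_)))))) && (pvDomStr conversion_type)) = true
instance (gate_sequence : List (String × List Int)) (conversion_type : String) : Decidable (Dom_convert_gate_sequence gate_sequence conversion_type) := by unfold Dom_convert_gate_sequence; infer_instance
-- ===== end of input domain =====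

-- B replaces A's flat four-branch enumeration by a recursive rewrite-rule system
-- (CY reduces to S.CX.S_DAG with the CX rewritten recursively); alternative decomposition.


-- ===== PORT A =====
-- odd_qubits = [qubits[i] for i in range(1, len(qubits), 2)]   (index always in range)
def pvOddA (qubits : List Int) : List Int :=
  (PySem.List.pyRange 1 qubits.length 2).map (fun i => PySem.List.pyGetD qubits i 0)

def convert_gate_sequence (gate_sequence : List (String × List Int)) (conversion_type : String) : List (String × List Int) :=
  match gate_sequence with
  | [] => []
  | (gate_type, qubits) :: rest =>
    if conversion_type == "CZ_native" && gate_type == "CX" then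
      ("H", pvOddA qubits) :: ("CZ", qubits) :: ("H", pvOddA qubits) ::
        convert_gate_sequence rest conversion_type
    else if conversion_type == "CZ_native" && gate_type == "CY" then
      ("S", pvOddA qubits) :: ("H", pvOddA qubits) :: ("CZ", qubits) ::
        ("H", pvOddA qubits) :: ("S_DAG", pvOddA qubits) ::
        convert_gate_sequence rest conversion_type
    else if conversion_type == "CNOT_native" && gate_type == "CZ" then
      ("H", pvOddA qubits) :: ("CX", qubits) :: ("H", pvOddA qubits) ::
        convert_gate_sequence rest conversion_type
    else if conversion_type == "CNOT_native" && gate_type == "CY" then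
      ("S", pvOddA qubits) :: ("CX", qubits) :: ("S_DAG", pvOddA qubits) ::
        convert_gate_sequence rest conversion_type
    else
      (gate_type, qubits) :: convert_gate_sequence rest conversion_type

-- ===== PORT B =====
-- odd = qubits[1::2]  (step 2 ≠ 0, so the slice never fails)
def pvOddB (qubits : List Int) : List Int :=
  (PySem.List.slice? qubits (some 1) none 2).getD []

-- recursive rewrite rules; the CY rule calls the rewriter again on "CX"
def pvRewrite (gate_type : String) (qubits : List Int) (conversion_type : String) : List (String × List Int) :=
  if gate_type == "CY" && (conversion_type == "CZ_native" || conversion_type == "CNOT_native") then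
    ("S", pvOddB qubits) :: (pvRewrite "CX" qubits conversion_type ++ [("S_DAG", pvOddB qubits)])
  else if gate_type == "CX" && conversion_type == "CZ_native" then
    [("H", pvOddB qubits), ("CZ", qubits), ("H", pvOddB qubits)]
  else if gate_type == "CZ" && conversion_type == "CNOT_native" then
    [("H", pvOddB qubits), ("CX", qubits), ("H", pvOddB qubits)]
  else [(gate_type, qubits)]
termination_by (if gate_type == "CY" then 1 else 0)
decreasing_by simp_all

def convert_gate_sequence_alt (gate_sequence : List (String × List Int)) (conversion_type : String) : List (String × List Int) :=
  gate_sequence.flatMap (fun p => pvRewrite p.1 p.2 conversion_type)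

-- ===== PRECONDITION & SPEC =====
def Spec_convert_gate_sequence (gate_sequence : List (String × List Int)) (conversion_type : String) (out : List (String × List Int)) : Prop := out = convert_gate_sequence_alt gate_sequence conversion_type
instance (gate_sequence : List (String × List Int)) (conversion_type : String) (out : List (String × List Int)) : Decidable (Spec_convert_gate_sequence gate_sequence conversion_type out) := by unfold Spec_convert_gate_sequence; infer_instance

-- ===== CLAIM (what is proved, stated in full; the proofs are below) =====
def Claim_equal_convert_gate_sequence : Prop := ∀ (gate_sequence : List (String × List Int)) (conversion_type : String), Dom_convert_gate_sequence gate_sequence conversion_type → Spec_convert_gate_sequence gate_sequence conversion_type (convert_gate_sequence gate_sequence conversion_type)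

-- ===== LEMMAS AND PROOFS =====

-- A's index comprehension over range(1, len, 2) and B's slice qubits[1::2] produce the same list.
theorem pvOddA_eq_slice (xs : List Int) : pvOddA xs = pvOddB xs := by
  unfold pvOddA pvOddB
  rw [PySem.List.pyRange_of_pos _ _ (by norm_num)]
  simp only [PySem.List.slice?, PySem.List.sliceIndices]
  rcases xs with _ | ⟨a, t⟩
  · simp
  · simp only [List.length_cons]
    norm_num
    rw [List.filterMap_congr (g := fun k : Nat =>
        some (PySem.List.pyGetD (a :: t) (1 + 2 * (k : Int)) 0)) ?_]
    · rw [show (fun k : Nat => some (PySem.List.pyGetD (a :: t) (1 + 2 * (k : Int)) 0)) =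
        (some ∘ fun k : Nat => PySem.List.pyGetD (a :: t) (1 + 2 * (k : Int)) 0) from rfl,
        List.filterMap_eq_map]
      simp [Function.comp]
    · intro k hk
      split_ifs at hk with hlen
      · have hk' := List.mem_range.mp hk
        have hidx : (1 + 2 * (k : Int)).toNat < (a :: t).length := by
          simp only [List.length_cons]; omega
        have h0 : (0 : Int) ≤ 1 + 2 * (k : Int) := by positivity
        simp only [PySem.List.pyGetD_eq_getElem (a :: t) 0 h0 (by exact_mod_cast hidx),
          List.getElem?_eq_getElem hidx]
      · simp at hk

theorem convert_gate_sequence_eq_alt (gate_sequence : List (String × List Int)) (conversion_type : String) :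
    convert_gate_sequence gate_sequence conversion_type = convert_gate_sequence_alt gate_sequence conversion_type := by
  induction gate_sequence with
  | nil => rfl
  | cons hd rest ih =>
    obtain ⟨gate_type, qubits⟩ := hd
    rw [convert_gate_sequence]
    unfold convert_gate_sequence_alt at ih ⊢
    simp only [List.flatMap_cons]
    rw [pvRewrite]
    by_cases hc1 : conversion_type = "CZ_native" <;>
      by_cases hc2 : conversion_type = "CNOT_native" <;>
      by_cases hg1 : gate_type = "CX" <;>
      by_cases hg2 : gate_type = "CY" <;>
      by_cases hg3 : gate_type = "CZ" <;>
      simp_all [pvRewrite, pvOddA_eq_slice]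

-- ===== VERDICT (by name: the statement is the Claim_ definition above) =====
theorem convert_gate_sequence_spec : Claim_equal_convert_gate_sequence := by
  intro gs ct _
  unfold Spec_convert_gate_sequence
  exact convert_gate_sequence_eq_alt gs ct
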